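-- pv_equiv track=rewrite | github.com/Venue6603/ANTAgent | AntAgent/autodev/diff_doctor.py | enforce_context
-- ===== SOURCE A (Python) =====
-- from typing import Tuple
--
-- def enforce_context(diff_text: str, min_context: int = 1) -> Tuple[bool, str]:
--     """
--     Ensure each hunk contains at least `min_context` context lines.
--     Returns (ok, maybe_fixed_diff).
--     """
--     if min_context <= 0:
--         return True, diff_text
--     # soft check: require at least one ' ' line after each @@ header
--     parts = diff_text.splitlines()
--     out, ok = [], True
--     pending_hunk = False
--     ctx_count = 0
--     for ln in parts:
--         if ln.startswith("@@"):
--             if pending_hunk and ctx_count < min_context: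
--                 ok = False
--             pending_hunk = True
--             ctx_count = 0
--             out.append(ln)
--             continue
--         if pending_hunk:
--             if ln.startswith(" "):
--                 ctx_count += 1
--             if ln.startswith("@@"):
--                 # will be handled next iteration; keep flow
--                 pass
--         out.append(ln)
--     if pending_hunk and ctx_count < min_context:
--         ok = False
--     return ok, "\n".join(out) + ("\n" if diff_text.endswith("\n") else "")
-- ===== SOURCE B (Python) =====
-- def enforce_context(diff_text: str, min_context: int = 1):
--     """Partition the diff into hunks once, then validate each hunk's context count."""
--     if min_context <= 0:
--         return True, diff_text
--     lines = diff_text.splitlines()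
--     hunks = []
--     for ln in lines:
--         if ln.startswith("@@"):
--             hunks.append([])
--         elif hunks:
--             hunks[-1].append(ln)
--     ok = all(sum(1 for l in h if l.startswith(" ")) >= min_context for h in hunks)
--     return ok, "\n".join(lines) + ("\n" if diff_text.endswith("\n") else "")
-- ===== Notes on version B (the rewrite author's own statement) =====
-- stated objective: simpler
-- what changed: B replaces A's 4-variable stateful scan (pending flag, running context counter, deferred ok-flips) by partitioning the lines into hunks once and checking all hunks with a single all(...) over per-hunk context counts; the output text is the rejoined line list directly.
import Mathlib
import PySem

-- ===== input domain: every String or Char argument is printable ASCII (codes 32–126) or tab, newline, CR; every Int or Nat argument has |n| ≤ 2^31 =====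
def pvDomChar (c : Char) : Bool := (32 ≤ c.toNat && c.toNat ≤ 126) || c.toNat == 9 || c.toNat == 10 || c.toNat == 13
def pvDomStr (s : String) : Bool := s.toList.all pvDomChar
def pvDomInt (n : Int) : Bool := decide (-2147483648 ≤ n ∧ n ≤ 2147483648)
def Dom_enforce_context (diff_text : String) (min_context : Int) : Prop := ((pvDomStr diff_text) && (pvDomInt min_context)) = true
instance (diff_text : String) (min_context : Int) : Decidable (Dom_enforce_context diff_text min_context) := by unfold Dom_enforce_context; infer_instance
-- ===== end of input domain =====

-- B partitions the diff lines into hunks once and validates them with a single `all`,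
-- instead of A's stateful scan with a pending flag, running counter and deferred ok-flips.


-- exact port of Python `a + b` on str (kernel-computable, avoids opaque String.append)
def strConcat (a b : String) : String := String.ofList (a.toList ++ b.toList)

-- ===== PORT A =====
-- one step of A's for-loop; state = (out, ok, pending_hunk, ctx_count)
def stepA (m : Int) (s : List String × Bool × Bool × Int) (ln : String) :
    List String × Bool × Bool × Int :=
  match s with
  | (out, ok, pending, ctx) =>
    if PySem.Str.startswith ln "@@" then
      (out ++ [ln], (if pending && decide (ctx < m) then false else ok), true, 0)
    else
      (out ++ [ln], ok, pending,
        if pending && PySem.Str.startswith ln " " then ctx + 1 else ctx)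

def enforce_context (diff_text : String) (min_context : Int) : Bool × String :=
  if min_context ≤ 0 then (true, diff_text)
  else
    let parts := PySem.Str.splitlines diff_text
    let s := parts.foldl (stepA min_context) ([], true, false, 0)
    let ok := if s.2.2.1 && decide (s.2.2.2 < min_context) then false else s.2.1
    (ok, strConcat (PySem.Str.join "\n" s.1)
          (if PySem.Str.endswith diff_text "\n" then "\n" else ""))

-- ===== PORT B =====
-- Source B keeps hunks in append order; this port conses (hunks and their lines reversed),
-- which leaves each hunk's context-line COUNT and the `all` over hunks unchanged.
def stepB (hs : List (List String)) (ln : String) : List (List String) :=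
  if PySem.Str.startswith ln "@@" then [] :: hs
  else match hs with
    | [] => []
    | h :: t => (ln :: h) :: t

-- per-hunk test: number of lines starting with " " is ≥ min_context
def hunkGood (m : Int) (h : List String) : Bool :=
  decide (m ≤ ((h.filter (fun l => PySem.Str.startswith l " ")).length : Int))

def enforce_context_alt (diff_text : String) (min_context : Int) : Bool × String :=
  if min_context ≤ 0 then (true, diff_text)
  else
    let lines := PySem.Str.splitlines diff_text
    let hunks := lines.foldl stepB []
    let ok := hunks.all (hunkGood min_context)
    (ok, strConcat (PySem.Str.join "\n" lines)
          (if PySem.Str.endswith diff_text "\n" then "\n" else ""))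

-- ===== PRECONDITION & SPEC =====
def Spec_enforce_context (diff_text : String) (min_context : Int) (out : Bool × String) : Prop := out = enforce_context_alt diff_text min_context
instance (diff_text : String) (min_context : Int) (out : Bool × String) : Decidable (Spec_enforce_context diff_text min_context out) := by unfold Spec_enforce_context; infer_instance

-- ===== CLAIM (what is proved, stated in full; the proofs are below) =====
def Claim_equal_enforce_context : Prop := ∀ (diff_text : String) (min_context : Int), Dom_enforce_context diff_text min_context → Spec_enforce_context diff_text min_context (enforce_context diff_text min_context)

-- ===== LEMMAS AND PROOFS =====

-- abstraction of B's hunk stack into A's loop variables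
def pendOf (hs : List (List String)) : Bool := !hs.isEmpty
def ctxOf (hs : List (List String)) : Int :=
  match hs with
  | [] => 0
  | h :: _ => ((h.filter (fun l => PySem.Str.startswith l " ")).length : Int)
def tailAll (m : Int) (hs : List (List String)) : Bool :=
  match hs with
  | [] => true
  | _ :: t => t.all (hunkGood m)

-- A's end-of-hunk check folded into ok equals B's `all` over the closed hunks
theorem flush_eq (m : Int) (ok : Bool) (hs : List (List String)) :
    (if pendOf hs && decide (ctxOf hs < m) then false else ok && tailAll m hs)
      = (ok && hs.all (hunkGood m)) := by
  match hs with
  | [] => rfl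
  | h :: t =>
    rw [show pendOf (h :: t) = true from rfl, Bool.true_and, List.all_cons,
      show tailAll m (h :: t) = t.all (hunkGood m) from rfl]
    by_cases hc : ctxOf (h :: t) < m
    · have hg : hunkGood m h = false := by
        have : ¬ m ≤ ctxOf (h :: t) := by omega
        exact decide_eq_false this
      rw [if_pos (decide_eq_true hc), hg, Bool.false_and, Bool.and_false]
    · have hg : hunkGood m h = true := by
        have : m ≤ ctxOf (h :: t) := by omega
        exact decide_eq_true this
      rw [if_neg (by simpa using hc), hg, Bool.true_and]

-- A's `out` accumulator just collects every line
theorem stepA_out (m : Int) (s : List String × Bool × Bool × Int) (ln : String) :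
    (stepA m s ln).1 = s.1 ++ [ln] := by
  rcases s with ⟨o, k, p, c⟩
  unfold stepA
  dsimp only
  split <;> rfl

theorem foldA_out (m : Int) :
    ∀ (parts : List String) (s : List String × Bool × Bool × Int),
      (parts.foldl (stepA m) s).1 = s.1 ++ parts := by
  intro parts
  induction parts with
  | nil => intro s; simp [List.foldl]
  | cons ln rest ih =>
    intro s
    rw [List.foldl_cons, ih (stepA m s ln), stepA_out, List.append_assoc]
    rfl

-- the finished ok-flag of A's loop equals B's `all` over the folded hunks
theorem foldA_ok (m : Int) :
    ∀ (parts : List String) (hs : List (List String)) (out : List String) (ok : Bool),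
      (let s := parts.foldl (stepA m) (out, ok && tailAll m hs, pendOf hs, ctxOf hs)
       if s.2.2.1 && decide (s.2.2.2 < m) then false else s.2.1)
      = (ok && (parts.foldl stepB hs).all (hunkGood m)) := by
  intro parts
  induction parts with
  | nil =>
    intro hs out ok
    exact flush_eq m ok hs
  | cons ln rest ih =>
    intro hs out ok
    rw [List.foldl_cons, List.foldl_cons]
    by_cases hAt : PySem.Str.startswith ln "@@" = true
    · -- header line: A flushes the pending check into ok, B opens a fresh hunk
      have hstep : stepA m (out, ok && tailAll m hs, pendOf hs, ctxOf hs) ln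
          = (out ++ [ln], ok && tailAll m ([] :: hs), pendOf ([] :: hs), ctxOf ([] :: hs)) := by
        unfold stepA
        dsimp only
        rw [if_pos hAt, flush_eq m ok hs,
          show tailAll m ([] :: hs) = hs.all (hunkGood m) from rfl,
          show pendOf ([] :: hs) = true from rfl, show ctxOf ([] :: hs) = 0 from rfl]
      have hstepB : stepB hs ln = [] :: hs := by unfold stepB; rw [if_pos hAt]
      rw [hstep, hstepB]
      exact ih ([] :: hs) (out ++ [ln]) ok
    · -- ordinary line: the counter update matches consing the line onto the open hunk
      match hs with
      | [] =>
        have hstep : stepA m (out, ok && tailAll m [], pendOf [], ctxOf []) ln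
            = (out ++ [ln], ok && tailAll m [], pendOf [], ctxOf []) := by
          unfold stepA
          dsimp only
          rw [if_neg hAt, show pendOf [] = false from rfl]
          simp
        have hstepB : stepB [] ln = [] := by unfold stepB; rw [if_neg hAt]
        rw [hstep, hstepB]
        exact ih [] (out ++ [ln]) ok
      | h :: t =>
        have hstep : stepA m (out, ok && tailAll m (h :: t), pendOf (h :: t), ctxOf (h :: t)) ln
            = (out ++ [ln], ok && tailAll m ((ln :: h) :: t), pendOf ((ln :: h) :: t),
               ctxOf ((ln :: h) :: t)) := by
          unfold stepA
          dsimp only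
          rw [if_neg hAt, show pendOf (h :: t) = true from rfl,
            show tailAll m (h :: t) = tailAll m ((ln :: h) :: t) from rfl,
            show pendOf ((ln :: h) :: t) = true from rfl]
          have hctx : (if (true && PySem.Str.startswith ln " ") = true then ctxOf (h :: t) + 1
              else ctxOf (h :: t)) = ctxOf ((ln :: h) :: t) := by
            by_cases hsp : PySem.Str.startswith ln " " = true
            · rw [show (true && PySem.Str.startswith ln " ") = PySem.Str.startswith ln " " from
                Bool.true_and _, if_pos hsp]
              simp only [ctxOf, List.filter_cons]
              rw [if_pos hsp]
              push_cast [List.length_cons]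
              ring
            · rw [show (true && PySem.Str.startswith ln " ") = PySem.Str.startswith ln " " from
                Bool.true_and _, if_neg hsp]
              simp only [ctxOf, List.filter_cons]
              rw [if_neg hsp]
          rw [hctx]
        have hstepB : stepB (h :: t) ln = (ln :: h) :: t := by unfold stepB; rw [if_neg hAt]
        rw [hstep, hstepB]
        exact ih ((ln :: h) :: t) (out ++ [ln]) ok

-- ===== VERDICT (by name: the statement is the Claim_ definition above) =====
theorem enforce_context_spec : Claim_equal_enforce_context := by
  intro diff_text m _
  unfold Spec_enforce_context enforce_context enforce_context_alt
  by_cases hm : m ≤ 0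
  · simp [hm]
  · simp only [hm, if_false]
    have hok := foldA_ok m (PySem.Str.splitlines diff_text) [] [] true
    simp only [tailAll, pendOf, ctxOf, Bool.and_true, List.isEmpty_nil, Bool.not_true,
      Bool.true_and] at hok
    have hout := foldA_out m (PySem.Str.splitlines diff_text) ([], true, false, 0)
    simp only [List.nil_append] at hout
    exact Prod.ext (by exact hok) (by rw [hout])
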